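-- pv_equiv track=rewrite | github.com/Datel1999CZ/algoritmizace_final | main.py | vypocitej_skore
-- ===== SOURCE A (Python) =====
-- def vypocitej_skore(kostky):
--     skore = 0
--     for kostka in kostky:
--         if kostka == 1:
--             skore += 100
--         elif kostka == 6:
--             skore += 60
--         else:
--             skore += kostka
--     return skore
-- ===== SOURCE B (Python) =====
-- def vypocitej_skore(kostky):
--     return sum(kostky) + 99 * kostky.count(1) + 54 * kostky.count(6)
-- ===== Notes on version B (the rewrite author's own statement) =====
-- stated objective: idiomatic
-- what changed: Replaces the per-element if/elif/else accumulation loop with a one-line arithmetic form: sum(kostky) plus 99 per 1 and 54 per 6 via count().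
import Mathlib
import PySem

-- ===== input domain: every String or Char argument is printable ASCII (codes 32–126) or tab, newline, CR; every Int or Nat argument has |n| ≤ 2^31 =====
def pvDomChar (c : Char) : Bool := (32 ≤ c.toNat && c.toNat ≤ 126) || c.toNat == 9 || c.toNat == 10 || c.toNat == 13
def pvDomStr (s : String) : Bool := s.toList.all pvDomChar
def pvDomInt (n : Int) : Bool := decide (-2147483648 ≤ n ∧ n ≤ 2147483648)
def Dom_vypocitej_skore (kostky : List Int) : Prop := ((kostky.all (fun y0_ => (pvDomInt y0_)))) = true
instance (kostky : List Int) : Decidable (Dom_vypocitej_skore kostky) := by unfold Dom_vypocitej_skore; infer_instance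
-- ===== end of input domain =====

-- B replaces the per-element branching loop with sum(kostky) + 99*count(1) + 54*count(6) (idiomatic one-liner, same cost).
-- ===== PORT A =====
def vypocitej_skore (kostky : List Int) : Int :=
  kostky.foldl (fun skore kostka =>
    if kostka = 1 then skore + 100
    else if kostka = 6 then skore + 60
    else skore + kostka) 0

-- ===== PORT B =====
def vypocitej_skore_alt (kostky : List Int) : Int :=
  kostky.sum + 99 * (PySem.List.count kostky 1) + 54 * (PySem.List.count kostky 6)

-- ===== PRECONDITION & SPEC =====
def Spec_vypocitej_skore (kostky : List Int) (out : Int) : Prop := out = vypocitej_skore_alt kostky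
instance (kostky : List Int) (out : Int) : Decidable (Spec_vypocitej_skore kostky out) := by unfold Spec_vypocitej_skore; infer_instance

-- ===== CLAIM (what is proved, stated in full; the proofs are below) =====
def Claim_equal_vypocitej_skore : Prop := ∀ (kostky : List Int), Dom_vypocitej_skore kostky → Spec_vypocitej_skore kostky (vypocitej_skore kostky)

-- ===== LEMMAS AND PROOFS =====

-- ===== VERDICT (by name: the statement is the Claim_ definition above) =====
lemma vskore_foldl (kostky : List Int) (s : Int) :
    kostky.foldl (fun skore kostka =>
      if kostka = 1 then skore + 100
      else if kostka = 6 then skore + 60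
      else skore + kostka) s
    = s + kostky.sum + 99 * (PySem.List.count kostky 1) + 54 * (PySem.List.count kostky 6) := by
  induction kostky generalizing s with
  | nil => simp [PySem.List.count]
  | cons x xs ih =>
    simp only [List.foldl_cons, ih, PySem.List.count, List.count_cons, List.sum_cons]
    by_cases h1 : x = 1
    · subst h1; simp; ring
    · by_cases h6 : x = 6
      · subst h6; simp [h1]; ring
      · simp [h1, h6, beq_iff_eq]; ring

theorem vypocitej_skore_spec : Claim_equal_vypocitej_skore := by
  intro kostky _
  unfold Spec_vypocitej_skore vypocitej_skore vypocitej_skore_alt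
  rw [vskore_foldl]; ring
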